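-- pv_equiv track=rewrite | github.com/shea-m/mat302-python-code | rho_factorization.py | rho_factorization
-- ===== SOURCE A (Python) =====
-- from math import gcd
--
-- def func(x: int, n: int) -> int:
--     return (pow(x, 2) + x + 1) % n
--
-- def rho_factorization(x_naught: int, n: int) -> int:
--     dict = {0: x_naught}
--     for i in range(1, n):
--         dict[i] = func(dict[i-1], n)
--         for k in range(i):
--             d = gcd(dict[i] - dict[k], n)
--             if d > 1:
--                 return d
-- ===== SOURCE B (Python) =====
-- from math import gcd
--
--
-- def rho_factorization(x_naught: int, n: int) -> int:
--     # Batched-gcd rho: one gcd per step on a running product of differences,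
--     # scanning for the actual colliding term only when the batch gcd fires.
--     xs = [x_naught]
--     x = x_naught
--     for _ in range(1, n):
--         x = (x * x + x + 1) % n
--         prod = 1
--         for xk in xs:
--             prod = prod * (x - xk) % n
--         if gcd(prod, n) > 1:
--             for xk in xs:
--                 d = gcd(x - xk, n)
--                 if d > 1:
--                     return d
--         xs.append(x)
-- ===== Notes on version B (the rewrite author's own statement) =====
-- stated objective: alternative
-- what changed: A computes a gcd with n for every previous sequence value at every step; B folds the differences into one running product mod n and takes a single gcd per step, rescanning for the colliding term only on the step where that batch gcd exceeds 1.
import Mathlib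
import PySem

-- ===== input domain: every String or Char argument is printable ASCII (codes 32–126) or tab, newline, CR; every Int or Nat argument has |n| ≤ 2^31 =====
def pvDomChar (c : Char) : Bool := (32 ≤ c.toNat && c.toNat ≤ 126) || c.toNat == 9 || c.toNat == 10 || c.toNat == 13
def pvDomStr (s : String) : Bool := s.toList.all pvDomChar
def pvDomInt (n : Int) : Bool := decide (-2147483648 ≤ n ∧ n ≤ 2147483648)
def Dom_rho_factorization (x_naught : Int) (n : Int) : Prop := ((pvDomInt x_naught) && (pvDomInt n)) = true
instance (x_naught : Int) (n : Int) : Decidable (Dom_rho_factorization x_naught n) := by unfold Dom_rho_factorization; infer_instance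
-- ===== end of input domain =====

-- B replaces A's per-pair gcd scan by one running product of differences mod n with a
-- single gcd per step, rescanning for the colliding term only when that gcd exceeds 1.

-- ===== PORT A =====

-- func(x, n) = (pow(x, 2) + x + 1) % n
def pyFunc (x : Int) (n : Int) : Int := PySem.Int.mod (x ^ 2 + x + 1) n

-- inner 'for k in range(i)': first k with gcd(dict[i]-dict[k], n) > 1 returns that gcd.
-- dict[k] is always present (keys 0..i), so getD's default is never used.
def rhoA_inner (n : Int) (xi : Int) (dict : PySem.Dict Int Int) : List Int → Option Int
  | [] => none
  | k :: ks =>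
      let d : Int := Int.gcd (xi - dict.getD k 0) n
      if 1 < d then some d else rhoA_inner n xi dict ks

-- outer 'for i in range(1, n)' as fuel recursion, fuel = (n-1).toNat
def rhoA_outer (n : Int) : Nat → Int → PySem.Dict Int Int → Option Int
  | 0, _, _ => none
  | fuel+1, i, dict =>
      let xi := pyFunc (dict.getD (i - 1) 0) n
      let dict' := dict.insert i xi
      match rhoA_inner n xi dict' (PySem.List.pyRange 0 i 1) with
      | some d => some d
      | none => rhoA_outer n fuel (i + 1) dict'

def rho_factorization (x_naught : Int) (n : Int) : Option Int :=
  rhoA_outer n (n - 1).toNat 1 ((PySem.Dict.empty : PySem.Dict Int Int).insert 0 x_naught)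

-- ===== PORT B =====

-- 'for xk in xs: d = gcd(x - xk, n); if d > 1: return d'
def rhoB_scan (n : Int) (x : Int) : List Int → Option Int
  | [] => none
  | xk :: rest =>
      let d : Int := Int.gcd (x - xk) n
      if 1 < d then some d else rhoB_scan n x rest

-- main 'for _ in range(1, n)' of Source B, fuel = (n-1).toNat
def rhoB_loop (n : Int) : Nat → Int → List Int → Option Int
  | 0, _, _ => none
  | fuel+1, x, xs =>
      let x' := PySem.Int.mod (x * x + x + 1) n
      let prod := xs.foldl (fun p xk => PySem.Int.mod (p * (x' - xk)) n) 1
      if 1 < (Int.gcd prod n : Int) then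
        match rhoB_scan n x' xs with
        | some d => some d
        | none => rhoB_loop n fuel x' (xs ++ [x'])
      else rhoB_loop n fuel x' (xs ++ [x'])

def rho_factorization_alt (x_naught : Int) (n : Int) : Option Int :=
  rhoB_loop n (n - 1).toNat x_naught [x_naught]

-- ===== PRECONDITION & SPEC =====
def Spec_rho_factorization (x_naught : Int) (n : Int) (out : Option Int) : Prop := out = rho_factorization_alt x_naught n
instance (x_naught : Int) (n : Int) (out : Option Int) : Decidable (Spec_rho_factorization x_naught n out) := by unfold Spec_rho_factorization; infer_instance

-- ===== CLAIM (what is proved, stated in full; the proofs are below) =====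
def Claim_equal_rho_factorization : Prop := ∀ (x_naught : Int) (n : Int), Dom_rho_factorization x_naught n → Spec_rho_factorization x_naught n (rho_factorization x_naught n)

-- ===== LEMMAS AND PROOFS =====

-- the rho sequence x_0, x_1, …
def seqN (x0 n : Int) : Nat → Int
  | 0 => x0
  | k+1 => pyFunc (seqN x0 n k) n

-- first index k < i with p k (scanned in increasing order)
def ffind (p : Nat → Bool) : Nat → Option Nat
  | 0 => none
  | i+1 =>
      match ffind p i with
      | some k => some k
      | none => if p i then some i else none

-- common driver both ports are proved equal to
def pvDriver (x0 n : Int) : Nat → Nat → Option Int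
  | 0, _ => none
  | fuel+1, i =>
      match ffind (fun k => decide (1 < Int.gcd (seqN x0 n i - seqN x0 n k) n)) i with
      | some k => some (Int.gcd (seqN x0 n i - seqN x0 n k) n)
      | none => pvDriver x0 n fuel (i + 1)

theorem ffind_eq_none {p : Nat → Bool} {i : Nat} :
    ffind p i = none ↔ ∀ k < i, p k = false := by
  induction i with
  | zero => simp [ffind]
  | succ i ih =>
    simp only [ffind]
    cases hf : ffind p i with
    | some a =>
      simp only [reduceCtorEq, false_iff]
      intro hall
      have ha : ¬ (∀ k < i, p k = false) := by rw [← ih]; simp [hf]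
      exact ha (fun k hk => hall k (by omega))
    | none =>
      have hall := ih.mp hf
      cases hpi : p i with
      | true =>
        simp only [hpi, if_true]
        constructor
        · intro h; exact absurd h (by simp)
        · intro h; exact absurd (h i (by omega)) (by simp [hpi])
      | false =>
        simp only [hpi, if_false, true_iff]
        constructor
        · intro _ k hk
          rcases Nat.lt_or_ge k i with hki | hki
          · exact hall k hki
          · have : k = i := by omega
            rw [this]; exact hpi
        · intro _; rfl

theorem ffind_eq_some {p : Nat → Bool} {i k : Nat} :
    ffind p i = some k ↔ k < i ∧ p k = true ∧ ∀ j < k, p j = false := by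
  induction i generalizing k with
  | zero => simp [ffind]
  | succ i ih =>
    simp only [ffind]
    cases hf : ffind p i with
    | some a =>
      have ha := ih.mp hf
      constructor
      · intro h
        have hak : a = k := by injection h
        subst hak
        exact ⟨by omega, ha.2.1, ha.2.2⟩
      · rintro ⟨hk, hpk, hmin⟩
        have hak : a = k := by
          rcases Nat.lt_trichotomy a k with h | h | h
          · exact absurd ha.2.1 (by rw [hmin a h]; simp)
          · exact h
          · exact absurd hpk (by rw [ha.2.2 k h]; simp)
        rw [hak]
    | none =>
      have hall : ∀ m < i, p m = false := ffind_eq_none.mp hf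
      cases hpi : p i with
      | true =>
        simp only [hpi, if_true]
        constructor
        · intro h
          have hik : i = k := by injection h
          subst hik
          exact ⟨by omega, hpi, fun j hj => hall j hj⟩
        · rintro ⟨hk, hpk, hmin⟩
          have hki : k = i := by
            by_contra hne
            have hlt : k < i := by omega
            exact absurd hpk (by rw [hall k hlt]; simp)
          rw [hki]
      | false =>
        simp only [hpi, if_false, reduceCtorEq, false_iff]
        rintro ⟨hk, hpk, hmin⟩
        have hki : k = i := by
          by_contra hne
          have hlt : k < i := by omega
          exact absurd hpk (by rw [hall k hlt]; simp)
        rw [hki] at hpk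
        exact absurd hpk (by simp [hpi])

-- ---------- A-side: rhoA equals the driver ----------

theorem rhoA_inner_append (n xi : Int) (dict : PySem.Dict Int Int) (l1 l2 : List Int) :
    rhoA_inner n xi dict (l1 ++ l2)
      = match rhoA_inner n xi dict l1 with
        | some d => some d
        | none => rhoA_inner n xi dict l2 := by
  induction l1 with
  | nil => simp [rhoA_inner]
  | cons k ks ih =>
    simp only [List.cons_append, rhoA_inner]
    by_cases h : 1 < (Int.gcd (xi - dict.getD k 0) n : Int)
    · simp [h]
    · simp [h, ih]

theorem rhoA_inner_range (x0 n xi : Int) (dict : PySem.Dict Int Int) (i : Nat)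
    (hdict : ∀ k : Nat, k < i → dict.get? (k : Int) = some (seqN x0 n k)) :
    rhoA_inner n xi dict (PySem.List.pyRange 0 (i : Int) 1)
      = (ffind (fun k => decide (1 < Int.gcd (xi - seqN x0 n k) n)) i).map
          (fun k => (Int.gcd (xi - seqN x0 n k) n : Int)) := by
  induction i with
  | zero =>
    rw [PySem.List.pyRange_one_eq_nil (by simp)]
    simp [rhoA_inner, ffind]
  | succ i ih =>
    have hcast : ((i + 1 : Nat) : Int) = (i : Int) + 1 := by push_cast; ring
    rw [hcast, PySem.List.pyRange_one_succ_right (by positivity), rhoA_inner_append]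
    rw [ih (fun k hk => hdict k (by omega))]
    have hgd : dict.getD (i : Int) 0 = seqN x0 n i :=
      PySem.Dict.getD_of_get?_eq_some _ 0 (hdict i (by omega))
    simp only [ffind]
    cases hf : ffind (fun k => decide (1 < Int.gcd (xi - seqN x0 n k) n)) i with
    | some k => simp
    | none =>
      simp only [Option.map_none]
      by_cases hgt : 1 < Int.gcd (xi - seqN x0 n i) n
      · simp [rhoA_inner, hgd, hgt]
      · have : ¬ (1 : Int) < (Int.gcd (xi - seqN x0 n i) n : Int) := by exact_mod_cast hgt
        simp [rhoA_inner, hgd, hgt, this]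

theorem rhoA_eq_driver (x0 n : Int) :
    ∀ (fuel : Nat) (i : Nat) (dict : PySem.Dict Int Int), 1 ≤ i →
      (∀ k : Nat, k < i → dict.get? (k : Int) = some (seqN x0 n k)) →
      rhoA_outer n fuel (i : Int) dict = pvDriver x0 n fuel i := by
  intro fuel
  induction fuel with
  | zero => intro i dict _ _; rfl
  | succ fuel ih =>
    intro i dict h1 hdict
    have hsub : (i : Int) - 1 = ((i - 1 : Nat) : Int) := by
      have : ((i : Nat) : Int) = ((i - 1 : Nat) : Int) + 1 := by
        push_cast [Nat.cast_sub h1]; ring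
      omega
    have hx : pyFunc (dict.getD ((i : Int) - 1) 0) n = seqN x0 n i := by
      rw [hsub, PySem.Dict.getD_of_get?_eq_some _ 0 (hdict (i - 1) (by omega))]
      have : seqN x0 n ((i - 1) + 1) = pyFunc (seqN x0 n (i - 1)) n := rfl
      rw [← this, Nat.sub_add_cancel h1]
    have hdict' : ∀ k : Nat, k < i + 1 →
        (dict.insert (i : Int) (seqN x0 n i)).get? (k : Int) = some (seqN x0 n k) := by
      intro k hk
      by_cases hki : k = i
      · subst hki; simp [PySem.Dict.get?_insert_self]
      · rw [PySem.Dict.get?_insert_of_ne _ _ (by exact_mod_cast hki)]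
        exact hdict k (by omega)
    simp only [rhoA_outer, pvDriver, hx]
    rw [rhoA_inner_range x0 n (seqN x0 n i) _ i (fun k hk => hdict' k (by omega))]
    cases hf : ffind (fun k => decide (1 < Int.gcd (seqN x0 n i - seqN x0 n k) n)) i with
    | some k => simp
    | none =>
      simp only [Option.map_none]
      have hcast : ((i + 1 : Nat) : Int) = (i : Int) + 1 := by push_cast; ring
      rw [← hcast]
      exact ih (i + 1) _ (by omega) hdict'

theorem rhoA_main (x0 n : Int) :
    rho_factorization x0 n = pvDriver x0 n (n - 1).toNat 1 := by
  have h := rhoA_eq_driver x0 n (n - 1).toNat 1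
    ((PySem.Dict.empty : PySem.Dict Int Int).insert 0 x0) (by omega) ?_
  · rw [show rho_factorization x0 n = rhoA_outer n (n - 1).toNat ((1:Nat) : Int) ((PySem.Dict.empty : PySem.Dict Int Int).insert 0 x0) from by norm_num [rho_factorization]]
    exact h
  · intro k hk
    have : k = 0 := by omega
    subst this
    simp [PySem.Dict.get?_insert_self, seqN]

-- ---------- B-side: batch gcd facts ----------

-- reducing the product mod n does not change its gcd with n
theorem gcd_mod_left (a n : Int) (hn : 0 < n) :
    Int.gcd (PySem.Int.mod a n) n = Int.gcd a n := by
  rw [PySem.Int.mod_eq_emod_of_pos hn, Int.emod_def, sub_eq_add_neg,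
      show -(n * (a / n)) = (-(a / n)) * n from by ring, Int.gcd_add_mul_right_left]

-- gcd with a product exceeds 1 iff it does for one of the factors (n ≠ 0)
theorem gcd_mul_gt_one (a b n : Int) (hn : 0 < n) :
    1 < Int.gcd (a * b) n ↔ 1 < Int.gcd a n ∨ 1 < Int.gcd b n := by
  have hpos : ∀ c : Int, 0 < Int.gcd c n := fun c => Int.gcd_pos_iff.mpr (Or.inr (by omega))
  have hcop : Nat.Coprime (a * b).natAbs n.natAbs ↔
      Nat.Coprime a.natAbs n.natAbs ∧ Nat.Coprime b.natAbs n.natAbs := by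
    rw [Int.natAbs_mul]; exact Nat.coprime_mul_iff_left
  have h1 := hpos (a * b); have h2 := hpos a; have h3 := hpos b
  unfold Int.gcd at *
  unfold Nat.Coprime at hcop
  omega

theorem gcd_fold (n x' : Int) (hn : 0 < n) :
    ∀ (l : List Int) (p : Int),
      1 < Int.gcd (l.foldl (fun p xk => PySem.Int.mod (p * (x' - xk)) n) p) n ↔
        1 < Int.gcd p n ∨ ∃ a ∈ l, 1 < Int.gcd (x' - a) n := by
  intro l
  induction l with
  | nil => intro p; simp [List.foldl]
  | cons a rest ih =>
    intro p
    simp only [List.foldl]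
    rw [ih, gcd_mod_left _ _ hn, gcd_mul_gt_one _ _ _ hn]
    simp only [List.mem_cons]
    constructor
    · rintro (⟨h | h⟩ | ⟨b, hb, h⟩)
      · exact Or.inl h
      · exact Or.inr ⟨a, Or.inl rfl, h⟩
      · exact Or.inr ⟨b, Or.inr hb, h⟩
    · rintro (h | ⟨b, (rfl | hb), h⟩)
      · exact Or.inl (Or.inl h)
      · exact Or.inl (Or.inr h)
      · exact Or.inr ⟨b, hb, h⟩

-- ---------- B-side: the recovery scan over the stored sequence ----------

theorem rhoB_scan_append (n x : Int) (l1 l2 : List Int) :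
    rhoB_scan n x (l1 ++ l2)
      = match rhoB_scan n x l1 with
        | some d => some d
        | none => rhoB_scan n x l2 := by
  induction l1 with
  | nil => simp [rhoB_scan]
  | cons a ks ih =>
    simp only [List.cons_append, rhoB_scan]
    by_cases h : 1 < (Int.gcd (x - a) n : Int)
    · simp [h]
    · simp [h, ih]

theorem rhoB_scan_range (x0 n x' : Int) (i : Nat) :
    rhoB_scan n x' ((List.range i).map (seqN x0 n))
      = (ffind (fun k => decide (1 < Int.gcd (x' - seqN x0 n k) n)) i).map
          (fun k => (Int.gcd (x' - seqN x0 n k) n : Int)) := by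
  induction i with
  | zero => simp [rhoB_scan, ffind]
  | succ i ih =>
    rw [List.range_succ, List.map_append, rhoB_scan_append, ih]
    simp only [List.map_cons, List.map_nil, ffind]
    cases hf : ffind (fun k => decide (1 < Int.gcd (x' - seqN x0 n k) n)) i with
    | some k => simp
    | none =>
      simp only [Option.map_none]
      by_cases hgt : 1 < Int.gcd (x' - seqN x0 n i) n
      · simp [rhoB_scan, hgt]
      · have : ¬ (1 : Int) < (Int.gcd (x' - seqN x0 n i) n : Int) := by exact_mod_cast hgt
        simp [rhoB_scan, hgt, this]

-- ---------- B-side: rhoB equals the driver ----------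

theorem rhoB_eq_driver (x0 n : Int) (hn : 2 ≤ n) :
    ∀ (fuel : Nat) (i : Nat), 1 ≤ i →
      rhoB_loop n fuel (seqN x0 n (i - 1)) ((List.range i).map (seqN x0 n))
        = pvDriver x0 n fuel i := by
  intro fuel
  induction fuel with
  | zero => intro i _; rfl
  | succ fuel ih =>
    intro i h1
    have hx : PySem.Int.mod (seqN x0 n (i - 1) * seqN x0 n (i - 1) + seqN x0 n (i - 1) + 1) n
        = seqN x0 n i := by
      conv_rhs => rw [← Nat.sub_add_cancel h1]
      show _ = pyFunc (seqN x0 n (i - 1)) n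
      unfold pyFunc
      ring_nf
    have hcond : (1 < Int.gcd (((List.range i).map (seqN x0 n)).foldl
          (fun p xk => PySem.Int.mod (p * (seqN x0 n i - xk)) n) 1) n) ↔
        ffind (fun k => decide (1 < Int.gcd (seqN x0 n i - seqN x0 n k) n)) i ≠ none := by
      rw [gcd_fold n (seqN x0 n i) (by omega)]
      have h1gcd : Int.gcd 1 n = 1 := by simp
      constructor
      · rintro (h | ⟨a, ha, h⟩)
        · omega
        · obtain ⟨k, hk, rfl⟩ := List.mem_map.mp ha
          intro hnone
          have := ffind_eq_none.mp hnone k (List.mem_range.mp hk)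
          simp only [decide_eq_false_iff_not] at this
          exact this h
      · intro hne
        cases hf : ffind (fun k => decide (1 < Int.gcd (seqN x0 n i - seqN x0 n k) n)) i with
        | none => exact absurd hf hne
        | some k =>
          obtain ⟨hk, hpk, _⟩ := ffind_eq_some.mp hf
          exact Or.inr ⟨seqN x0 n k, List.mem_map.mpr ⟨k, List.mem_range.mpr hk, rfl⟩,
            by simpa using hpk⟩
    simp only [rhoB_loop, pvDriver, hx]
    rw [rhoB_scan_range x0 n (seqN x0 n i) i]
    cases hf : ffind (fun k => decide (1 < Int.gcd (seqN x0 n i - seqN x0 n k) n)) i with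
    | some k =>
      rw [if_pos (show (1:Int) < _ from by exact_mod_cast hcond.mpr (by rw [hf]; simp))]
      simp
    | none =>
      rw [if_neg (show ¬ (1:Int) < _ from by
        intro hc
        exact absurd (hcond.mp (by exact_mod_cast hc)) (by rw [hf]; simp))]
      have hxs : (List.range i).map (seqN x0 n) ++ [seqN x0 n i]
          = (List.range (i + 1)).map (seqN x0 n) := by
        rw [List.range_succ, List.map_append]; rfl
      rw [hxs]
      have hx' : seqN x0 n i = seqN x0 n ((i + 1) - 1) := by norm_num
      rw [hx']
      exact ih (i + 1) (by omega)

theorem rhoB_main (x0 n : Int) (hn : 2 ≤ n) :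
    rho_factorization_alt x0 n = pvDriver x0 n (n - 1).toNat 1 := by
  have h := rhoB_eq_driver x0 n hn (n - 1).toNat 1 (by omega)
  simpa [rho_factorization_alt, seqN] using h

-- ===== VERDICT (by name: the statement is the Claim_ definition above) =====
theorem rho_factorization_spec : Claim_equal_rho_factorization := by
  intro x0 n _
  unfold Spec_rho_factorization
  by_cases hn : n < 2
  · have hA : rho_factorization x0 n = none := by
      rw [rho_factorization, show (n - 1).toNat = 0 from by omega]
      rfl
    have hB : rho_factorization_alt x0 n = none := by
      rw [rho_factorization_alt, show (n - 1).toNat = 0 from by omega]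
      rfl
    rw [hA, hB]
  · rw [rhoA_main, rhoB_main x0 n (by omega)]
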